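-- pv_equiv track=rewrite | github.com/elisaF/extractGroups | classify_byron.py | _contiguous_pos_indices
-- ===== SOURCE A (Python) =====
-- def _contiguous_pos_indices(y):
--     groups, cur_group = [], []
--     last_y = None
--     for idx, y_i in enumerate(list(y)):
--         if y_i == last_y == 1:
--             cur_group.append(idx)
--         elif y_i == 1:
--             # then last_y was -1, but this is 1.
--             cur_group = [idx]
--         elif last_y == 1:
--             groups.append(cur_group)
--             cur_group = []
--         last_y = y_i
--
--     if len(cur_group) > 0:
--         groups.append(cur_group)
--     return groups
-- ===== SOURCE B (Python) =====
-- def _contiguous_pos_indices(y):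
--     # two-phase: collect indices of ones, then segment them by gaps
--     pos = [i for i, v in enumerate(y) if v == 1]
--     groups = []
--     for i in pos:
--         if groups and groups[-1][-1] == i - 1:
--             groups[-1].append(i)
--         else:
--             groups.append([i])
--     return groups
-- ===== Notes on version B (the rewrite author's own statement) =====
-- stated objective: alternative
-- what changed: Replaced the single-pass last_y/cur_group state machine with a two-phase decomposition: first collect the flat list of indices where y[i]==1, then a second pass groups consecutive indices by comparing each index with the last element of the last group.
import Mathlib
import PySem

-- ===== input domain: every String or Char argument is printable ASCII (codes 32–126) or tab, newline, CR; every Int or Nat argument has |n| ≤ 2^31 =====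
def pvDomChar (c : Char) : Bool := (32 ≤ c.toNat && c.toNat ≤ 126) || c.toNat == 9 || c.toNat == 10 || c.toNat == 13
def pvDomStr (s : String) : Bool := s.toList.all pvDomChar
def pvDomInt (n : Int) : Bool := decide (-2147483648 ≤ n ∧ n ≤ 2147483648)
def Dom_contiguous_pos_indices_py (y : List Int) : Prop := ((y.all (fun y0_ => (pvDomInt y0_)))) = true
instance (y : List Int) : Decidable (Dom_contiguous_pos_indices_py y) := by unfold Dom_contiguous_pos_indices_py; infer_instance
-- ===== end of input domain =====

-- B replaces A's single-pass last_y state machine with a two-phase decomposition (collect the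
-- indices of ones, then segment them by gaps); objective: alternative, same asymptotic cost.

-- ===== PORT A =====
-- loop body; state = (groups, cur_group, last_y), last_y : Option Int (None initially);
-- `y_i == last_y == 1` is Python's chained comparison: y_i == last_y and last_y == 1
def pvStepA (s : List (List Int) × List Int × Option Int) (p : Int × Int) :
    List (List Int) × List Int × Option Int :=
  let s' :=
    if some p.2 = s.2.2 ∧ s.2.2 = some 1 then (s.1, s.2.1 ++ [p.1], s.2.2)
    else if p.2 = 1 then (s.1, [p.1], s.2.2)
    else if s.2.2 = some 1 then (s.1 ++ [s.2.1], ([] : List Int), s.2.2)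
    else s
  (s'.1, s'.2.1, some p.2)

def contiguous_pos_indices_py (y : List Int) : List (List Int) :=
  let st := (PySem.List.enumerate y).foldl pvStepA ([], [], none)
  if st.2.1.length > 0 then st.1 ++ [st.2.1] else st.1

-- ===== PORT B =====
-- loop body: `groups and groups[-1][-1] == i - 1` — the truthiness test is getLast? = some g,
-- and g[-1] is exact as getLast? since every stored group is nonempty (never raises)
def pvStepB (gs : List (List Int)) (i : Int) : List (List Int) :=
  match gs.getLast? with
  | some g => if g.getLast? = some (i - 1) then gs.dropLast ++ [g ++ [i]] else gs ++ [[i]]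
  | none => gs ++ [[i]]

def contiguous_pos_indices_py_alt (y : List Int) : List (List Int) :=
  let pos := ((PySem.List.enumerate y).filter (fun p => p.2 == 1)).map (fun p => p.1)
  pos.foldl pvStepB []

-- ===== PRECONDITION & SPEC =====
def Spec_contiguous_pos_indices_py (y : List Int) (out : List (List Int)) : Prop := out = contiguous_pos_indices_py_alt y
instance (y : List Int) (out : List (List Int)) : Decidable (Spec_contiguous_pos_indices_py y out) := by unfold Spec_contiguous_pos_indices_py; infer_instance

-- ===== CLAIM (what is proved, stated in full; the proofs are below) =====
def Claim_equal_contiguous_pos_indices_py : Prop := ∀ (y : List Int), Dom_contiguous_pos_indices_py y → Spec_contiguous_pos_indices_py y (contiguous_pos_indices_py y)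

-- ===== LEMMAS AND PROOFS =====

-- invariant tying A's loop state (about to process index k) to B's fold state
def pvInv (k : Int) (groups : List (List Int)) (cur : List Int) (last : Option Int) : Prop :=
  (if last = some 1 then cur.getLast? = some (k - 1) ∧ ∀ i ∈ cur, i < k else cur = []) ∧
  (∀ g ∈ groups, ∀ i ∈ g, i + 2 ≤ k)

theorem pv_main (y : List Int) : ∀ (k : Int) (groups : List (List Int)) (cur : List Int)
    (last : Option Int), pvInv k groups cur last →
    (let st := (PySem.List.enumerate y k).foldl pvStepA (groups, cur, last)
     if st.2.1.length > 0 then st.1 ++ [st.2.1] else st.1)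
    = (((PySem.List.enumerate y k).filter (fun p => p.2 == 1)).map (fun p => p.1)).foldl
        pvStepB (groups ++ if cur = [] then [] else [cur]) := by
  induction y with
  | nil =>
    intro k groups cur last hinv
    simp only [PySem.List.enumerate_nil, List.foldl_nil, List.filter_nil, List.map_nil]
    by_cases hc : cur = [] <;> simp [hc, List.length_pos_iff]
  | cons yi ys ih =>
    intro k groups cur last hinv
    obtain ⟨h1, h2⟩ := hinv
    simp only [PySem.List.enumerate_cons, List.foldl_cons, List.filter_cons]
    by_cases hy : yi = 1
    · subst hy
      by_cases hl : last = some 1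
      · -- y_i = 1 and last_y = 1 : extend the current run
        subst hl
        simp only [reduceIte] at h1
        obtain ⟨hlast, hlt⟩ := h1
        have hcur : cur ≠ [] := by intro h; simp [h] at hlast
        have hstep : pvStepA (groups, cur, some 1) (k, 1) = (groups, cur ++ [k], some 1) := by
          simp [pvStepA]
        have hB : pvStepB (groups ++ [cur]) k = groups ++ [cur ++ [k]] := by
          simp [pvStepB, hlast]
        rw [hstep,
          ih (k + 1) groups (cur ++ [k]) (some 1)
            (by
              refine ⟨?_, fun g hg i hi => by have := h2 g hg i hi; omega⟩
              simp only [reduceIte]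
              refine ⟨by simp, fun i hi => ?_⟩
              rcases List.mem_append.mp hi with h | h
              · have := hlt i h; omega
              · simp at h; omega)]
        simp [hcur, hB, show cur ++ [k] ≠ [] by simp]
      · -- y_i = 1 but last_y ≠ 1 : start a new run (cur_group = [])
        have hc : cur = [] := by simpa [hl] using h1
        subst hc
        have hstep : pvStepA (groups, [], last) (k, 1) = (groups, [k], some 1) := by
          simp [pvStepA, hl]
        have hB : pvStepB groups k = groups ++ [[k]] := by
          cases hg : groups.getLast? with
          | none => simp [pvStepB, hg]
          | some g =>
            have hglt : g.getLast? ≠ some (k - 1) := by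
              intro h
              have := h2 g (List.mem_of_getLast? hg) (k - 1) (List.mem_of_getLast? h)
              omega
            simp [pvStepB, hg, hglt]
        rw [hstep,
          ih (k + 1) groups [k] (some 1)
            (by
              refine ⟨?_, fun g hg i hi => by have := h2 g hg i hi; omega⟩
              simp only [reduceIte]
              exact ⟨by simp, fun i hi => by simp at hi; omega⟩)]
        simp [hB]
    · -- y_i ≠ 1 : this index is not collected
      have hb : (yi == 1) = false := by simpa using hy
      simp only [hb, Bool.false_eq_true, if_false]
      by_cases hl : last = some 1
      · -- close the current group
        subst hl
        simp only [reduceIte] at h1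
        obtain ⟨hlast, hlt⟩ := h1
        have hcur : cur ≠ [] := by intro h; simp [h] at hlast
        have hstep : pvStepA (groups, cur, some 1) (k, yi) =
            (groups ++ [cur], [], some yi) := by
          simp [pvStepA, hy]
        rw [hstep,
          ih (k + 1) (groups ++ [cur]) [] (some yi)
            (by
              refine ⟨by simp [show ¬ (some yi = some (1:Int)) by simpa using hy], ?_⟩
              intro g hg i hi
              rcases List.mem_append.mp hg with h | h
              · have := h2 g h i hi; omega
              · simp at h; subst h; have := hlt i hi; omega)]
        simp [hcur]
      · -- nothing to do
        have hc : cur = [] := by simpa [hl] using h1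
        subst hc
        have hstep : pvStepA (groups, [], last) (k, yi) = (groups, [], some yi) := by
          simp [pvStepA, hy, hl]
        rw [hstep,
          ih (k + 1) groups [] (some yi)
            (by
              refine ⟨by simp [show ¬ (some yi = some (1:Int)) by simpa using hy], ?_⟩
              exact fun g hg i hi => by have := h2 g hg i hi; omega)]

-- ===== VERDICT (by name: the statement is the Claim_ definition above) =====
theorem contiguous_pos_indices_py_spec : Claim_equal_contiguous_pos_indices_py := by
  intro y _
  unfold Spec_contiguous_pos_indices_py contiguous_pos_indices_py contiguous_pos_indices_py_alt
  have := pv_main y 0 [] [] none (by simp [pvInv])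
  simpa using this
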